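-- pv_equiv track=rewrite | github.com/THAPELOTC/Kimiollo | services.py | _parse_text_to_structured
-- ===== SOURCE A (Python) =====
-- from typing import Dict, List, Any
--
-- def _parse_text_to_structured(text: str) -> Dict[str, Any]:
--     """Parse unstructured text into structured business plan format"""
--
--     sections = {}
--     current_section = None
--     current_content = []
--
--     lines = text.split('\n')
--
--     for line in lines:
--         line = line.strip()
--         if not line:
--             continue
--
--         # Check if this line is a section header
--         if any(keyword in line.lower() for keyword in
--                ['executive summary', 'company description', 'market analysis',
--                 'organization', 'management', 'service', 'product', 'marketing',
--                 'sales', 'funding', 'financial']):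
--
--             # Save previous section
--             if current_section:
--                 sections[current_section] = '\n'.join(current_content)
--
--             # Start new section
--             current_section = line
--             current_content = []
--         else:
--             current_content.append(line)
--
--     # Save last section
--     if current_section:
--         sections[current_section] = '\n'.join(current_content)
--
--     return sections if sections else {"content": text}
-- ===== SOURCE B (Python) =====
-- def _parse_text_to_structured(text: str):
--     """Parse unstructured text into structured business plan format.
--
--     Re-implementation: first normalise to the list of stripped non-empty lines,
--     then consume that list in header-delimited blocks with an index cursor,
--     instead of a single streaming loop carrying current-section state."""
--     keywords = ['executive summary', 'company description', 'market analysis',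
--                 'organization', 'management', 'service', 'product', 'marketing',
--                 'sales', 'funding', 'financial']
--
--     def is_header(line):
--         low = line.lower()
--         return any(k in low for k in keywords)
--
--     lines = [s for s in (raw.strip() for raw in text.split('\n')) if s]
--     n = len(lines)
--
--     # discard everything before the first header
--     i = 0
--     while i < n and not is_header(lines[i]):
--         i += 1
--
--     sections = {}
--     while i < n:
--         header = lines[i]
--         i += 1
--         start = i
--         while i < n and not is_header(lines[i]):
--             i += 1
--         sections[header] = '\n'.join(lines[start:i])
--
--     return sections if sections else {"content": text}
-- ===== Notes on version B (the rewrite author's own statement) =====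
-- stated objective: alternative
-- what changed: B first materialises the list of stripped non-empty lines and then consumes it in header-delimited blocks with an index cursor (drop preamble, then repeatedly take header + following content slice), instead of A's single streaming loop carrying current-section/current-content state that is flushed at each header and at the end.
import Mathlib
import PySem

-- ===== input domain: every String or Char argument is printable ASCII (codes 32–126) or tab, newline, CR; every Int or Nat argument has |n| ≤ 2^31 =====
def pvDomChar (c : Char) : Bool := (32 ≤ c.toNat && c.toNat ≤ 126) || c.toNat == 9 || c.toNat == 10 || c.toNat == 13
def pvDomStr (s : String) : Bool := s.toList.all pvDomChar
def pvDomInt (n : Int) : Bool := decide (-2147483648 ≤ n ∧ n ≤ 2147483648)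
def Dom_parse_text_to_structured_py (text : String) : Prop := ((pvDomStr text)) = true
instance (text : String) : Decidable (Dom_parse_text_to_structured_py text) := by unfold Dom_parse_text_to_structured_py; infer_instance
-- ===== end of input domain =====

-- B is an alternative decomposition of A (list-of-blocks consumed with an index cursor instead
-- of a streaming loop with flush-on-header state); same O(n) cost, same return value everywhere.

-- ===== PORT A =====
def pvKeywords : List String :=
  ["executive summary", "company description", "market analysis",
   "organization", "management", "service", "product", "marketing",
   "sales", "funding", "financial"]

def pvIsHeader (line : String) : Bool :=
  pvKeywords.any (fun k => PySem.Str.isIn k (PySem.Str.lower line))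

-- text.split('\n'): the separator is the literal "\n" ≠ "", so split? is always some
def pvSplitNL (text : String) : List String :=
  (PySem.Str.split? text "\n").getD []

-- loop body for a stripped, non-empty line (A's 'if any(...) ... else' block);
-- state = (sections, current_section, current_content).  'if current_section:' is ported as a
-- match on the Option: current_section is only ever None or a non-empty stripped line.
def pvAStep (st : PySem.Dict String String × Option String × List String) (line : String) :
    PySem.Dict String String × Option String × List String :=
  if pvIsHeader line then
    match st.2.1 with
    | some h => ((st.1.insert h (PySem.Str.join "\n" st.2.2)), some line, [])
    | none => (st.1, some line, [])
  else (st.1, st.2.1, st.2.2 ++ [line])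

def parse_text_to_structured_py (text : String) : List (String × String) :=
  let st := (pvSplitNL text).foldl
    (fun st raw =>
      let line := PySem.Str.strip raw
      if line = "" then st else pvAStep st line)
    ((PySem.Dict.empty : PySem.Dict String String), none, [])
  let sections := match st.2.1 with
    | some h => st.1.insert h (PySem.Str.join "\n" st.2.2)
    | none => st.1
  if sections.items = [] then [("content", text)] else sections.items

-- ===== PORT B =====
-- lines = [s for s in (raw.strip() for raw in text.split('\n')) if s]
def pvBLines (text : String) : List String :=
  ((pvSplitNL text).map PySem.Str.strip).filter (fun s => s ≠ "")

-- the nested cursor loops: standing ON a header, emit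
-- (header, '\n'.join(content up to next header)) and continue at the next header
def pvBGroups : List String → List (String × String)
  | [] => []
  | h :: t =>
    (h, PySem.Str.join "\n" (t.takeWhile (fun l => !pvIsHeader l))) ::
      pvBGroups (t.dropWhile (fun l => !pvIsHeader l))
termination_by l => l.length
decreasing_by exact Nat.lt_succ_of_le (List.length_dropWhile_le _ _)

def parse_text_to_structured_py_alt (text : String) : List (String × String) :=
  let body := (pvBLines text).dropWhile (fun l => !pvIsHeader l)  -- discard pre-header lines
  let sections := (pvBGroups body).foldl
    (fun d p => d.insert p.1 p.2) (PySem.Dict.empty : PySem.Dict String String)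
  if sections.items = [] then [("content", text)] else sections.items

-- ===== PRECONDITION & SPEC =====
def Spec_parse_text_to_structured_py (text : String) (out : List (String × String)) : Prop := out = parse_text_to_structured_py_alt text
instance (text : String) (out : List (String × String)) : Decidable (Spec_parse_text_to_structured_py text out) := by unfold Spec_parse_text_to_structured_py; infer_instance

-- ===== CLAIM (what is proved, stated in full; the proofs are below) =====
def Claim_equal_parse_text_to_structured_py : Prop := ∀ (text : String), Dom_parse_text_to_structured_py text → Spec_parse_text_to_structured_py text (parse_text_to_structured_py text)

-- ===== LEMMAS AND PROOFS =====

-- A's end-of-loop flush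
def pvFinal (st : PySem.Dict String String × Option String × List String) :
    PySem.Dict String String :=
  match st.2.1 with
  | some h => st.1.insert h (PySem.Str.join "\n" st.2.2)
  | none => st.1

def pvInsAll (d : PySem.Dict String String) (gs : List (String × String)) :
    PySem.Dict String String :=
  gs.foldl (fun d p => d.insert p.1 p.2) d

-- A's raw-line loop equals the same loop over the stripped non-empty lines
theorem pvFold_filter (raws : List String)
    (st : PySem.Dict String String × Option String × List String) :
    raws.foldl (fun st raw =>
      let line := PySem.Str.strip raw
      if line = "" then st else pvAStep st line) st
      = ((raws.map PySem.Str.strip).filter (fun s => s ≠ "")).foldl pvAStep st := by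
  induction raws generalizing st with
  | nil => rfl
  | cons r t ih =>
    simp only [List.foldl_cons, List.map_cons, List.filter_cons]
    by_cases h : PySem.Str.strip r = "" <;> simp [h, ih]

-- with a current section open, the rest of A's loop inserts (h, acc ++ content-to-next-header)
-- and then the groups of the remaining list
theorem pvFold_some (L : List String) (d : PySem.Dict String String) (h : String)
    (acc : List String) :
    pvFinal (L.foldl pvAStep (d, some h, acc))
      = pvInsAll d ((h, PySem.Str.join "\n" (acc ++ L.takeWhile (fun l => !pvIsHeader l))) ::
          pvBGroups (L.dropWhile (fun l => !pvIsHeader l))) := by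
  induction L generalizing d h acc with
  | nil => simp [pvFinal, pvInsAll, pvBGroups]
  | cons l t ih =>
    by_cases hl : pvIsHeader l = true
    · have e : pvAStep (d, some h, acc) l
          = (d.insert h (PySem.Str.join "\n" acc), some l, []) := by
        simp [pvAStep, hl]
      simp only [List.foldl_cons, e]
      rw [ih]
      simp [pvInsAll, pvBGroups, hl]
    · have e : pvAStep (d, some h, acc) l = (d, some h, acc ++ [l]) := by
        simp [pvAStep, hl]
      simp only [List.foldl_cons, e]
      rw [ih]
      simp [hl, List.append_assoc]

-- with no current section, A drops lines until the first header and then matches pvBGroups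
theorem pvFold_none (L : List String) (d : PySem.Dict String String) (c : List String) :
    pvFinal (L.foldl pvAStep (d, none, c))
      = pvInsAll d (pvBGroups (L.dropWhile (fun l => !pvIsHeader l))) := by
  induction L generalizing c with
  | nil => simp [pvFinal, pvInsAll, pvBGroups]
  | cons l t ih =>
    by_cases hl : pvIsHeader l = true
    · have e : pvAStep (d, none, c) l = (d, some l, []) := by simp [pvAStep, hl]
      simp only [List.foldl_cons, e]
      rw [pvFold_some]
      simp [pvBGroups, hl]
    · have e : pvAStep (d, none, c) l = (d, none, c ++ [l]) := by simp [pvAStep, hl]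
      simp only [List.foldl_cons, e]
      rw [ih]
      simp [hl]

-- ===== VERDICT (by name: the statement is the Claim_ definition above) =====
theorem parse_text_to_structured_py_spec : Claim_equal_parse_text_to_structured_py := by
  intro text _
  show parse_text_to_structured_py text = parse_text_to_structured_py_alt text
  unfold parse_text_to_structured_py parse_text_to_structured_py_alt
  rw [pvFold_filter]
  have h := pvFold_none (((pvSplitNL text).map PySem.Str.strip).filter (fun s => s ≠ ""))
    PySem.Dict.empty []
  simp only [pvFinal, pvInsAll] at h
  simp only [pvBLines]
  rw [h]
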